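-- pv_equiv track=rewrite | github.com/mileto94/HackBulgaria | week0/First/16-biggestDiff/solution.py | biggest_difference
-- ===== SOURCE A (Python) =====
-- def biggest_difference(arr):
-- 	min = arr[0]
-- 	max = arr[0]
-- 	for item in arr:
-- 		if item < min:
-- 			min = item
-- 	for item in arr:
-- 		if item > max:
-- 			max = item
--
-- 	return min-max
-- ===== SOURCE B (Python) =====
-- def biggest_difference(arr):
--     s = sorted(arr)
--     return s[0] - s[-1]
-- ===== Notes on version B (the rewrite author's own statement) =====
-- stated objective: alternative
-- what changed: B sorts the array once and returns first element minus last element, instead of A's two linear min/max scans.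
-- outside the precondition, e.g. on biggest_difference([]): A raises IndexError, B raises IndexError
import Mathlib
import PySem

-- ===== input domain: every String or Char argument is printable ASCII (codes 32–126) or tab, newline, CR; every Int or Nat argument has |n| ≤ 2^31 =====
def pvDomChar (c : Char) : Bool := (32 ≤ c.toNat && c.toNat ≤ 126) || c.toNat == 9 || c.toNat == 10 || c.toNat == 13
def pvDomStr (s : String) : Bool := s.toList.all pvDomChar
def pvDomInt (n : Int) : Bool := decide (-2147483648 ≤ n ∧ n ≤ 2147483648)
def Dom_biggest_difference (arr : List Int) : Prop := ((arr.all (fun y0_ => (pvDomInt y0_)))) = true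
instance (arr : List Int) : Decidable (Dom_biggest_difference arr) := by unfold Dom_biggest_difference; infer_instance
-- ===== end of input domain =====

-- B sorts once and returns first minus last element, instead of A's two min/max scans (alternative algorithm); both raise IndexError on [], excluded by Pre_.
-- ===== PORT A =====
def biggest_difference (arr : List Int) : Int :=
  match arr with
  | [] => 0  -- unreachable under Pre_ (Python raises IndexError on arr[0])
  | h :: _ =>
    let mn := arr.foldl (fun mn item => if item < mn then item else mn) h
    let mx := arr.foldl (fun mx item => if item > mx then item else mx) h
    mn - mx

-- ===== PORT B =====
def biggest_difference_alt (arr : List Int) : Int :=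
  let s := PySem.List.sorted arr (fun x => x) false
  match s with
  | [] => 0  -- unreachable under Pre_ (Python raises IndexError on s[0])
  | h :: t => h - (h :: t).getLast (by simp)   -- s[0] - s[-1]

-- ===== PRECONDITION & SPEC =====
-- Pre_ excludes the empty list, on which A raises IndexError.
def Pre_biggest_difference (arr : List Int) : Prop := arr ≠ []
instance (arr : List Int) : Decidable (Pre_biggest_difference arr) := by unfold Pre_biggest_difference; infer_instance
def pvWitness_biggest_difference : List Int := [3, -1, 4]
def Spec_biggest_difference (arr : List Int) (out : Int) : Prop := out = biggest_difference_alt arr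
instance (arr : List Int) (out : Int) : Decidable (Spec_biggest_difference arr out) := by unfold Spec_biggest_difference; infer_instance

-- ===== CLAIM (what is proved, stated in full; the proofs are below) =====
def Claim_equal_biggest_difference : Prop := ∀ (arr : List Int), Dom_biggest_difference arr → Pre_biggest_difference arr → Spec_biggest_difference arr (biggest_difference arr)

-- ===== LEMMAS AND PROOFS =====
-- A's first loop over h :: t computes the running minimum, i.e. t.foldl min h.
theorem fold_min_eq (l : List Int) (a : Int) :
    l.foldl (fun mn item => if item < mn then item else mn) a = l.foldl min a := by
  induction l generalizing a with
  | nil => rfl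
  | cons x xs ih =>
    simp only [List.foldl]
    rw [ih]
    congr 1
    rw [Int.min_def]; split_ifs <;> omega

theorem fold_max_eq (l : List Int) (a : Int) :
    l.foldl (fun mx item => if item > mx then item else mx) a = l.foldl max a := by
  induction l generalizing a with
  | nil => rfl
  | cons x xs ih =>
    simp only [List.foldl]
    rw [ih]
    congr 1
    rw [Int.max_def]; split_ifs <;> omega

theorem foldl_min_mem (l : List Int) (a : Int) : l.foldl min a = a ∨ l.foldl min a ∈ l := by
  induction l generalizing a with
  | nil => left; rfl
  | cons x xs ih =>
    simp only [List.foldl]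
    rcases ih (min a x) with h | h
    · rcases le_total a x with hle | hle
      · left; rw [h, min_eq_left hle]
      · right; rw [h, min_eq_right hle]; exact List.mem_cons_self
    · right; exact List.mem_cons_of_mem _ h

theorem foldl_min_le (l : List Int) (a : Int) :
    l.foldl min a ≤ a ∧ ∀ y ∈ l, l.foldl min a ≤ y := by
  induction l generalizing a with
  | nil => exact ⟨le_refl _, by simp⟩
  | cons x xs ih =>
    obtain ⟨h1, h2⟩ := ih (min a x)
    refine ⟨le_trans h1 (min_le_left _ _), ?_⟩
    intro y hy
    rcases List.mem_cons.mp hy with rfl | hy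
    · exact le_trans h1 (min_le_right _ _)
    · exact h2 y hy

theorem foldl_max_mem (l : List Int) (a : Int) : l.foldl max a = a ∨ l.foldl max a ∈ l := by
  induction l generalizing a with
  | nil => left; rfl
  | cons x xs ih =>
    simp only [List.foldl]
    rcases ih (max a x) with h | h
    · rcases le_total a x with hle | hle
      · right; rw [h, max_eq_right hle]; exact List.mem_cons_self
      · left; rw [h, max_eq_left hle]
    · right; exact List.mem_cons_of_mem _ h

theorem foldl_max_ge (l : List Int) (a : Int) :
    a ≤ l.foldl max a ∧ ∀ y ∈ l, y ≤ l.foldl max a := by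
  induction l generalizing a with
  | nil => exact ⟨le_refl _, by simp⟩
  | cons x xs ih =>
    obtain ⟨h1, h2⟩ := ih (max a x)
    refine ⟨le_trans (le_max_left _ _) h1, ?_⟩
    intro y hy
    rcases List.mem_cons.mp hy with rfl | hy
    · exact le_trans (le_max_right _ _) h1
    · exact h2 y hy

-- the last element of the (ascending) sorted list bounds every member from above
theorem getLast_sorted_ge (xs : List Int) (m : Int) (t : List Int)
    (hs : PySem.List.sorted xs (fun x => x) false = m :: t) :
    ∀ y ∈ xs, y ≤ (m :: t).getLast (by simp) := by
  intro y hy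
  have hmem : y ∈ PySem.List.sorted xs (fun x => x) false :=
    (PySem.List.mem_sorted _ _ _ _).mpr hy
  rw [hs] at hmem
  obtain ⟨p, hp, hyp⟩ := List.mem_iff_getElem.mp hmem
  have hlast : (m :: t).getLast (by simp) = (m :: t)[(m :: t).length - 1] :=
    (List.getLast_eq_getElem _)
  rw [hlast]
  have := PySem.List.key_sorted_getElem_mono (xs := xs) (key := fun x => x)
      (p := p) (q := (m :: t).length - 1)
      (by omega) (by rw [hs]; simp)
  simp only [hs] at this
  rw [← hyp]
  exact this

-- ===== VERDICT (by name: the statement is the Claim_ definition above) =====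
theorem biggest_difference_spec : Claim_equal_biggest_difference := by
  intro arr _ hpre
  unfold Spec_biggest_difference
  match arr, hpre with
  | h :: t, _ =>
    unfold biggest_difference biggest_difference_alt
    simp only [fold_min_eq, fold_max_eq]
    have hnil : PySem.List.sorted (h :: t) (fun x => x) false ≠ [] := by
      simp [PySem.List.sorted_eq_nil_iff]
    obtain ⟨m, s', hs⟩ := List.exists_cons_of_ne_nil hnil
    simp only [hs]
    -- min side
    have hmn_mem : (h :: t).foldl min h ∈ (h :: t) := by
      rcases foldl_min_mem (h :: t) h with he | hm
      · rw [he]; exact List.mem_cons_self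
      · exact hm
    have hmn_le : ∀ y ∈ (h :: t), (h :: t).foldl min h ≤ y := (foldl_min_le (h :: t) h).2
    have hm_mem : m ∈ (h :: t) := by
      have : m ∈ PySem.List.sorted (h :: t) (fun x => x) false := by rw [hs]; exact List.mem_cons_self
      exact (PySem.List.mem_sorted _ _ _ _).mp this
    have hm_le : ∀ y ∈ (h :: t), m ≤ y := PySem.List.key_head_sorted_le (h :: t) (fun x => x) hs
    have hmin_eq : (h :: t).foldl min h = m :=
      le_antisymm (hmn_le m hm_mem) (hm_le _ hmn_mem)
    -- max side
    have hmx_mem : (h :: t).foldl max h ∈ (h :: t) := by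
      rcases foldl_max_mem (h :: t) h with he | hm
      · rw [he]; exact List.mem_cons_self
      · exact hm
    have hmx_ge : ∀ y ∈ (h :: t), y ≤ (h :: t).foldl max h := (foldl_max_ge (h :: t) h).2
    have hlast_mem : (m :: s').getLast (by simp) ∈ (h :: t) := by
      have : (m :: s').getLast (by simp) ∈ PySem.List.sorted (h :: t) (fun x => x) false := by
        rw [hs]; exact List.getLast_mem _
      exact (PySem.List.mem_sorted _ _ _ _).mp this
    have hmax_eq : (h :: t).foldl max h = (m :: s').getLast (by simp) :=
      le_antisymm (getLast_sorted_ge (h :: t) m s' hs _ hmx_mem) (hmx_ge _ hlast_mem)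
    rw [hmin_eq, hmax_eq]
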